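-- pv_equiv track=rewrite | github.com/Dhivi264/Pondy | backend/tests/training/test_property_pipeline.py | _run_dedup
-- ===== SOURCE A (Python) =====
-- HASH_THRESHOLD = 8
--
-- def _run_dedup(input_hashes: list[int]) -> list[int]:
--     """
--     Simulate the deduplication loop from _prepare_dataset using integer hashes.
--     Returns the list of kept hash values.
--     """
--     kept: list[int] = []
--     hashes: list[int] = []
--     for h in input_hashes:
--         is_dup = any(abs(h - existing) < HASH_THRESHOLD for existing in hashes)
--         if not is_dup:
--             kept.append(h)
--             hashes.append(h)
--     return kept
-- ===== SOURCE B (Python) =====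
-- HASH_THRESHOLD = 8
--
-- def _run_dedup(input_hashes):
--     """Dedup via a sorted side list: binary-search the insertion point and
--     compare only the two nearest neighbours instead of scanning every kept hash."""
--     kept = []
--     s = []  # kept hashes, in sorted order
--     for h in input_hashes:
--         # leftmost insertion point of h in s (hand-rolled bisect_left)
--         lo, hi = 0, len(s)
--         while lo < hi:
--             mid = (lo + hi) // 2
--             if s[mid] < h:
--                 lo = mid + 1
--             else:
--                 hi = mid
--         if (lo > 0 and h - s[lo - 1] < HASH_THRESHOLD) or \
--            (lo < len(s) and s[lo] - h < HASH_THRESHOLD):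
--             continue
--         kept.append(h)
--         s.insert(lo, h)
--     return kept
-- ===== Notes on version B (the rewrite author's own statement) =====
-- stated objective: faster
-- what changed: B keeps the accepted hashes in a sorted side list and binary-searches the insertion point, comparing the new hash only against its two nearest neighbours, instead of A's linear scan of every kept hash per element.
import Mathlib
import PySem

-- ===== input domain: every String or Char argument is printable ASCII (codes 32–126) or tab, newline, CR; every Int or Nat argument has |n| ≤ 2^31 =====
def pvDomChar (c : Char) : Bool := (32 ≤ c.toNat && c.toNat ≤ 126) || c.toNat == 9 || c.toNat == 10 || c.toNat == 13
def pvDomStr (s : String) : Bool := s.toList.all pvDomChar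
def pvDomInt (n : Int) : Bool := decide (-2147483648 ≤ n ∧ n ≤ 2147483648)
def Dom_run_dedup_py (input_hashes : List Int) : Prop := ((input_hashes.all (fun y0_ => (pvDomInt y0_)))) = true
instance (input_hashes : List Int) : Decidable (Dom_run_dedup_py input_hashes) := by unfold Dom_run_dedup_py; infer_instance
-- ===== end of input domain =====

-- B replaces A's per-element linear scan of all kept hashes by a sorted side list with a
-- hand-rolled binary search, testing only the two nearest neighbours (objective: faster).


-- ===== PORT A =====
-- Literal transliteration of A: linear 'any' scan over all kept hashes per element.
def run_dedup_py (input_hashes : List Int) : List Int :=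
  (input_hashes.foldl
    (fun (st : List Int × List Int) h =>
      let is_dup := st.2.any (fun existing => decide (|h - existing| < 8))
      if is_dup then st else (st.1 ++ [h], st.2 ++ [h]))
    (([] : List Int), ([] : List Int))).1

-- ===== PORT B =====
-- B's hand-rolled bisect_left: binary search on indices, transliterated.
def pvBisectLeft (s : List Int) (x : Int) (lo hi : Nat) : Nat :=
  if _h : lo < hi then
    let mid := (lo + hi) / 2
    if s.getD mid 0 < x then pvBisectLeft s x (mid + 1) hi else pvBisectLeft s x lo mid
  else lo
termination_by hi - lo
decreasing_by all_goals omega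

-- Transliteration of B: sorted side list, bisect, neighbour test, insert at position.
def run_dedup_py_alt (input_hashes : List Int) : List Int :=
  (input_hashes.foldl
    (fun (st : List Int × List Int) h =>
      let s := st.2
      let lo := pvBisectLeft s h 0 s.length
      if (decide (0 < lo) && decide (h - s.getD (lo - 1) 0 < 8)) ||
         (decide (lo < s.length) && decide (s.getD lo 0 - h < 8))
      then st
      else (st.1 ++ [h], PySem.List.insert s (lo : Int) h))
    (([] : List Int), ([] : List Int))).1

-- ===== PRECONDITION & SPEC =====
def Spec_run_dedup_py (input_hashes : List Int) (out : List Int) : Prop := out = run_dedup_py_alt input_hashes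
instance (input_hashes : List Int) (out : List Int) : Decidable (Spec_run_dedup_py input_hashes out) := by unfold Spec_run_dedup_py; infer_instance

-- ===== CLAIM (what is proved, stated in full; the proofs are below) =====
def Claim_equal_run_dedup_py : Prop := ∀ (input_hashes : List Int), Dom_run_dedup_py input_hashes → Spec_run_dedup_py input_hashes (run_dedup_py input_hashes)

-- ===== LEMMAS AND PROOFS =====

-- sorted lists are monotone in getD on in-range indices
theorem pvSorted_getD_mono (s : List Int) (hs : s.Pairwise (· ≤ ·)) (i j : Nat)
    (hij : i ≤ j) (hj : j < s.length) : s.getD i 0 ≤ s.getD j 0 := by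
  rcases Nat.lt_or_ge i j with hlt | hge
  · have := (List.pairwise_iff_getElem.mp hs) i j (lt_of_lt_of_le hlt (le_of_lt hj)) hj hlt
    rwa [List.getD_eq_getElem s 0 (lt_of_lt_of_le hlt (le_of_lt hj)), List.getD_eq_getElem s 0 hj]
  · have : i = j := le_antisymm hij hge
    subst this; exact le_refl _

-- characterisation of the binary search: everything left of the result is < x,
-- everything from the result on is ≥ x
theorem pvBisect_char (s : List Int) (x : Int) (lo hi : Nat) :
    hi ≤ s.length → lo ≤ hi → s.Pairwise (· ≤ ·) →
    (∀ j, j < lo → s.getD j 0 < x) →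
    (∀ j, hi ≤ j → j < s.length → x ≤ s.getD j 0) →
    lo ≤ pvBisectLeft s x lo hi ∧ pvBisectLeft s x lo hi ≤ hi ∧
      (∀ j, j < pvBisectLeft s x lo hi → s.getD j 0 < x) ∧
      (∀ j, pvBisectLeft s x lo hi ≤ j → j < s.length → x ≤ s.getD j 0) := by
  fun_induction pvBisectLeft s x lo hi with
  | case1 lo hi hlh mid hmid ih =>
    intro hhi hlo hs hbelow habove
    have hmlt : mid < hi := by omega
    have hnew : ∀ j, j < mid + 1 → s.getD j 0 < x := by
      intro j hj
      exact lt_of_le_of_lt (pvSorted_getD_mono s hs j mid (by omega) (by omega)) hmid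
    have := ih hhi (by omega) hs hnew habove
    exact ⟨by omega, this.2.1, this.2.2.1, this.2.2.2⟩
  | case2 lo hi hlh mid hmid ih =>
    intro hhi hlo hs hbelow habove
    have hmge : x ≤ s.getD mid 0 := le_of_not_gt hmid
    have hnew : ∀ j, mid ≤ j → j < s.length → x ≤ s.getD j 0 := by
      intro j hj hjl
      exact le_trans hmge (pvSorted_getD_mono s hs mid j hj hjl)
    have := ih (by omega) (by omega) hs hbelow hnew
    exact ⟨this.1, by omega, this.2.2.1, this.2.2.2⟩
  | case3 lo hi hlh =>
    intro hhi hlo hs hbelow habove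
    exact ⟨le_refl _, hlo, hbelow, fun j hj hjl => habove j (by omega) hjl⟩

-- the two-neighbour test on the sorted list decides 'some kept hash is within 8'
theorem pvDup_iff (s : List Int) (h : Int) (hs : s.Pairwise (· ≤ ·)) :
    (((decide (0 < pvBisectLeft s h 0 s.length) &&
        decide (h - s.getD (pvBisectLeft s h 0 s.length - 1) 0 < 8)) ||
      (decide (pvBisectLeft s h 0 s.length < s.length) &&
        decide (s.getD (pvBisectLeft s h 0 s.length) 0 - h < 8))) = true) ↔
      ∃ e ∈ s, |h - e| < 8 := by
  obtain ⟨-, hle, hlt, hge⟩ :=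
    pvBisect_char s h 0 s.length (le_refl _) (Nat.zero_le _) hs
      (by intro j hj; omega) (by intro j hj hjl; omega)
  set lo := pvBisectLeft s h 0 s.length with hlo
  simp only [Bool.or_eq_true, Bool.and_eq_true, decide_eq_true_eq]
  constructor
  · rintro (⟨h0, hnear⟩ | ⟨hl, hnear⟩)
    · refine ⟨s.getD (lo - 1) 0, ?_, ?_⟩
      · have : lo - 1 < s.length := by omega
        rw [List.getD_eq_getElem s 0 this]; exact s.getElem_mem this
      · have := hlt (lo - 1) (by omega)
        rw [abs_lt]; omega
    · refine ⟨s.getD lo 0, ?_, ?_⟩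
      · rw [List.getD_eq_getElem s 0 hl]; exact s.getElem_mem hl
      · have := hge lo (le_refl _) hl
        rw [abs_lt]; omega
  · rintro ⟨e, he, hnear⟩
    obtain ⟨j, hj, hje⟩ := List.mem_iff_getElem.mp he
    have hje' : s.getD j 0 = e := by rw [List.getD_eq_getElem s 0 hj, hje]
    rw [abs_lt] at hnear
    rcases Nat.lt_or_ge j lo with hjlo | hjlo
    · left
      have h1 := hlt (lo - 1) (by omega)
      have h2 : s.getD j 0 ≤ s.getD (lo - 1) 0 :=
        pvSorted_getD_mono s hs j (lo - 1) (by omega) (by omega)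
      exact ⟨by omega, by omega⟩
    · right
      have h1 : lo < s.length := by omega
      have h2 : s.getD lo 0 ≤ s.getD j 0 := pvSorted_getD_mono s hs lo j hjlo hj
      exact ⟨h1, by omega⟩

-- inserting at the bisect position keeps the side list sorted and is a
-- permutation of consing
theorem pvInsert_sorted (s : List Int) (h : Int) (lo : Nat) (hle : lo ≤ s.length)
    (hlt : ∀ j, j < lo → s.getD j 0 < h)
    (hge : ∀ j, lo ≤ j → j < s.length → h ≤ s.getD j 0)
    (hs : s.Pairwise (· ≤ ·)) :
    (s.take lo ++ h :: s.drop lo).Pairwise (· ≤ ·) := by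
  have htake : ∀ a ∈ s.take lo, a ≤ h := by
    intro a ha
    obtain ⟨m, hm, hma⟩ := List.mem_take_iff_getElem.mp ha
    have : s.getD m 0 = a := by
      rw [List.getD_eq_getElem s 0 (by omega)]; exact hma
    have := hlt m (by omega)
    omega
  have hdrop : ∀ b ∈ s.drop lo, h ≤ b := by
    intro b hb
    obtain ⟨m, hm, hmb⟩ := List.mem_iff_getElem.mp hb
    rw [List.getElem_drop] at hmb
    have hml : lo + m < s.length := by
      have := List.length_drop (l := s) (i := lo) ▸ hm; omega
    have : s.getD (lo + m) 0 = b := by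
      rw [List.getD_eq_getElem s 0 hml]; exact hmb
    have := hge (lo + m) (by omega) hml
    omega
  rw [List.pairwise_append]
  refine ⟨hs.sublist (List.take_sublist lo s), ?_, ?_⟩
  · rw [List.pairwise_cons]
    exact ⟨hdrop, hs.sublist (List.drop_sublist lo s)⟩
  · intro a ha b hb
    rcases List.mem_cons.mp hb with rfl | hb
    · exact htake a ha
    · exact le_trans (htake a ha) (hdrop b hb)

-- the fold invariant: A's scan list is a permutation of B's sorted list,
-- so both folds keep exactly the same elements in the same order
theorem pvLoop_eq (input : List Int) : ∀ (k hA sB : List Int),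
    hA.Perm sB → sB.Pairwise (· ≤ ·) →
    (input.foldl
      (fun (st : List Int × List Int) h =>
        let is_dup := st.2.any (fun existing => decide (|h - existing| < 8))
        if is_dup then st else (st.1 ++ [h], st.2 ++ [h])) (k, hA)).1 =
    (input.foldl
      (fun (st : List Int × List Int) h =>
        let s := st.2
        let lo := pvBisectLeft s h 0 s.length
        if (decide (0 < lo) && decide (h - s.getD (lo - 1) 0 < 8)) ||
           (decide (lo < s.length) && decide (s.getD lo 0 - h < 8))
        then st
        else (st.1 ++ [h], PySem.List.insert s (lo : Int) h)) (k, sB)).1 := by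
  induction input with
  | nil => intro k hA sB _ _; rfl
  | cons h t ih =>
    intro k hA sB hperm hsort
    simp only [List.foldl_cons]
    obtain ⟨-, hle, hbelow, habove⟩ :=
      pvBisect_char sB h 0 sB.length (le_refl _) (Nat.zero_le _) hsort
        (by intro j hj; omega) (by intro j hj hjl; omega)
    have hdup : (hA.any (fun existing => decide (|h - existing| < 8))) =
        ((decide (0 < pvBisectLeft sB h 0 sB.length) &&
          decide (h - sB.getD (pvBisectLeft sB h 0 sB.length - 1) 0 < 8)) ||
         (decide (pvBisectLeft sB h 0 sB.length < sB.length) &&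
          decide (sB.getD (pvBisectLeft sB h 0 sB.length) 0 - h < 8))) := by
      rcases Bool.eq_false_or_eq_true
          (hA.any (fun existing => decide (|h - existing| < 8))) with htrue | hfalse
      · rw [htrue]; symm
        rw [List.any_eq_true] at htrue
        obtain ⟨e, he, hne⟩ := htrue
        exact (pvDup_iff sB h hsort).mpr ⟨e, hperm.mem_iff.mp he, by simpa using hne⟩
      · rw [hfalse]; symm; rw [Bool.eq_false_iff]
        intro hcontra
        obtain ⟨e, he, hne⟩ := (pvDup_iff sB h hsort).mp hcontra
        have hx : hA.any (fun existing => decide (|h - existing| < 8)) = true :=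
          List.any_eq_true.mpr ⟨e, hperm.mem_iff.mpr he, by simpa using hne⟩
        rw [hfalse] at hx; exact Bool.false_ne_true hx
    simp only [hdup]
    by_cases hc : ((decide (0 < pvBisectLeft sB h 0 sB.length) &&
          decide (h - sB.getD (pvBisectLeft sB h 0 sB.length - 1) 0 < 8)) ||
         (decide (pvBisectLeft sB h 0 sB.length < sB.length) &&
          decide (sB.getD (pvBisectLeft sB h 0 sB.length) 0 - h < 8))) = true
    · simp only [hc, if_pos]
      exact ih k hA sB hperm hsort
    · rw [Bool.not_eq_true] at hc
      simp only [hc, Bool.false_eq_true, if_false]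
      rw [PySem.List.insert_natCast sB (pvBisectLeft sB h 0 sB.length) h hle]
      apply ih
      · have hp1 : (hA ++ [h]).Perm (h :: sB) :=
          (List.perm_append_singleton h hA).trans (hperm.cons h)
        have hp2 := List.perm_middle (a := h)
          (l₁ := sB.take (pvBisectLeft sB h 0 sB.length))
          (l₂ := sB.drop (pvBisectLeft sB h 0 sB.length))
        rw [List.take_append_drop] at hp2
        exact hp1.trans hp2.symm
      · exact pvInsert_sorted sB h _ hle hbelow habove hsort

-- ===== VERDICT (by name: the statement is the Claim_ definition above) =====
theorem run_dedup_py_spec : Claim_equal_run_dedup_py := by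
  intro input_hashes _
  unfold Spec_run_dedup_py run_dedup_py run_dedup_py_alt
  exact pvLoop_eq input_hashes [] [] [] (List.Perm.refl _) List.Pairwise.nil
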